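-- pv_equiv track=rewrite | github.com/amol-ship-it/agi-core | domains/arc/primitives.py | recolor_2nd_to_dominant
-- ===== SOURCE A (Python) =====
-- Grid = list[list[int]]
--
-- def recolor_2nd_to_dominant(grid: Grid) -> Grid:
--     """Recolor the 2nd most common non-bg color to the dominant non-bg color."""
--     if not grid or not grid[0]:
--         return grid
--     from collections import Counter
--     flat = [v for row in grid for v in row]
--     counts = Counter(flat)
--     bg = counts.most_common(1)[0][0]
--     non_bg = [v for v, _ in counts.most_common() if v != bg]
--     if len(non_bg) < 2:
--         return grid
--     dominant, accent = non_bg[0], non_bg[1]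
--     return [[dominant if v == accent else v for v in row] for row in grid]
-- ===== SOURCE B (Python) =====
-- Grid = list[list[int]]
--
-- def recolor_2nd_to_dominant(grid: Grid) -> Grid:
--     """Recolor the 2nd most common non-bg color to the dominant non-bg color."""
--     if not grid or not grid[0]:
--         return grid
--     counts = {}
--     for row in grid:
--         for v in row:
--             counts[v] = counts.get(v, 0) + 1
--     # background: most frequent color, first-inserted on ties (strict >)
--     bg_item = None
--     for item in counts.items():
--         if bg_item is None or item[1] > bg_item[1]:
--             bg_item = item
--     bg = bg_item[0]
--     # top two non-background colors, insertion order breaking count ties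
--     best = None
--     second = None
--     for item in counts.items():
--         if item[0] == bg:
--             continue
--         if best is None or item[1] > best[1]:
--             second = best
--             best = item
--         elif second is None or item[1] > second[1]:
--             second = item
--     if second is None:
--         return grid
--     dominant, accent = best[0], second[0]
--     return [[dominant if v == accent else v for v in row] for row in grid]
-- ===== Notes on version B (the rewrite author's own statement) =====
-- stated objective: alternative
-- what changed: B replaces flatten + Counter + most_common (a stable sort of the color counts) by one nested counting pass into a plain insertion-ordered dict followed by linear strict-greater scans that pick the background and the top two non-background colors directly, reproducing most_common's first-insertion tie-breaking without sorting.
import Mathlib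
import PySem

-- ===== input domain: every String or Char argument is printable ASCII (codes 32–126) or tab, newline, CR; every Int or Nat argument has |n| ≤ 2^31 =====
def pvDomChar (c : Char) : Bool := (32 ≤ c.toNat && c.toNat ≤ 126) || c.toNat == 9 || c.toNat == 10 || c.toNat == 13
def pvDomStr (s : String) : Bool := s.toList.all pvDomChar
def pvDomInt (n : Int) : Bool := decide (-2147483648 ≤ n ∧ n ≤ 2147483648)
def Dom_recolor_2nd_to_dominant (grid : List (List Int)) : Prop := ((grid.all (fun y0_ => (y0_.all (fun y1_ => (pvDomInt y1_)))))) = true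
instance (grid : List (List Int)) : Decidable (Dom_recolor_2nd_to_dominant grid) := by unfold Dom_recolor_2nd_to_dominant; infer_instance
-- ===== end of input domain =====

-- B replaces Counter.most_common (a sort of the color counts) by three linear scans of an
-- insertion-ordered count dict: first strict max = background, then first/second strict maxima
-- among the non-background colors (alternative decomposition, no sort).

-- ===== PORT A =====
def recolor_2nd_to_dominant (grid : List (List Int)) : List (List Int) :=
  match grid with
  | [] => grid                                  -- 'if not grid: return grid'
  | r0 :: _ =>
    if r0 = [] then grid else                   -- 'if not grid[0]: return grid'
      -- flat = [v for row in grid for v in row]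
      let flat := grid.foldl (fun acc row => row.foldl (fun a v => a ++ [v]) acc) []
      -- counts = Counter(flat)
      let counts := PySem.Dict.counter flat
      -- counts.most_common() = sorted(counts.items(), key=count, reverse=True) (stable)
      let mc := PySem.List.sorted counts.items (fun p => p.2) true
      match mc with
      | [] => grid                              -- unreachable under the guard (flat ≠ []); Python would raise IndexError
      | top :: _ =>
        let bg := top.1                         -- counts.most_common(1)[0][0]
        let non_bg := (mc.filter (fun p => decide ¬(p.1 = bg))).map (fun p => p.1)
        if non_bg.length < 2 then grid
        else
          let dominant := PySem.List.pyGetD non_bg 0 0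
          let accent := PySem.List.pyGetD non_bg 1 0
          grid.map (fun row => row.map (fun v => if v = accent then dominant else v))

-- ===== PORT B =====
-- loop body of B's background scan: 'if bg_item is None or item[1] > bg_item[1]: bg_item = item'
def pvBgStep (b : Option (Int × Int)) (it : Int × Int) : Option (Int × Int) :=
  match b with
  | none => some it
  | some p => if it.2 > p.2 then some it else some p

-- loop body of B's top-two scan (state = (best, second)), after the 'item[0] == bg' skip
def pvSelStep (s : Option (Int × Int) × Option (Int × Int)) (it : Int × Int) :
    Option (Int × Int) × Option (Int × Int) :=
  match s.1 with
  | none => (some it, none)                     -- 'second = best; best = item' (best was None, so was second)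
  | some b =>
    if it.2 > b.2 then (some it, some b)        -- 'second = best; best = item'
    else
      match s.2 with
      | none => (some b, some it)               -- 'second = item'
      | some c => if it.2 > c.2 then (some b, some it) else (some b, some c)

def recolor_2nd_to_dominant_alt (grid : List (List Int)) : List (List Int) :=
  match grid with
  | [] => grid
  | r0 :: _ =>
    if r0 = [] then grid else
      -- counts[v] = counts.get(v, 0) + 1 over all cells
      let counts := grid.foldl (fun d row => row.foldl (fun d v => d.modify v 0 (· + 1)) d) PySem.Dict.empty
      let bgItem := counts.items.foldl pvBgStep none
      match bgItem with
      | none => grid                            -- unreachable under the guard; Python's bg_item[0] would raise TypeError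
      | some bp =>
        let bg := bp.1
        let sel := counts.items.foldl
          (fun s it => if it.1 = bg then s else pvSelStep s it) (none, none)
        match sel with
        | (some b, some c) =>                   -- best, second both found
          grid.map (fun row => row.map (fun v => if v = c.1 then b.1 else v))
        | _ => grid                             -- 'if second is None: return grid'

-- ===== PRECONDITION & SPEC =====
def Spec_recolor_2nd_to_dominant (grid : List (List Int)) (out : List (List Int)) : Prop := out = recolor_2nd_to_dominant_alt grid
instance (grid : List (List Int)) (out : List (List Int)) : Decidable (Spec_recolor_2nd_to_dominant grid out) := by unfold Spec_recolor_2nd_to_dominant; infer_instance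

-- ===== CLAIM (what is proved, stated in full; the proofs are below) =====
def Claim_equal_recolor_2nd_to_dominant : Prop := ∀ (grid : List (List Int)), Dom_recolor_2nd_to_dominant grid → Spec_recolor_2nd_to_dominant grid (recolor_2nd_to_dominant grid)

-- ===== LEMMAS AND PROOFS =====

-- sorted [] = [] in the descending form
theorem pv_sorted_nil : PySem.List.sorted ([] : List (Int × Int)) (fun p => p.2) true = [] := by
  rw [PySem.List.sorted_eq_nil_iff]

-- adding one element to a descending stable sort is an ordered insertion
theorem pv_sorted_snoc (l : List (Int × Int)) (x : Int × Int) :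
    PySem.List.sorted (l ++ [x]) (fun p => p.2) true =
      PySem.List.insertBy (fun a b => decide (b.2 < a.2)) x
        (PySem.List.sorted l (fun p => p.2) true) := by
  rw [PySem.List.sorted_rev_eq_foldl_insertBy, PySem.List.sorted_rev_eq_foldl_insertBy,
    List.foldl_append, List.foldl_cons, List.foldl_nil]

-- head of the descending stable sort = result of the first-strict-max scan
theorem pv_scan1_eq (l : List (Int × Int)) :
    l.foldl pvBgStep none = (PySem.List.sorted l (fun p => p.2) true).head? := by
  induction l using List.reverseRecOn with
  | nil => rw [pv_sorted_nil]; rfl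
  | append_singleton l x ih =>
    rw [List.foldl_append, List.foldl_cons, List.foldl_nil, ih, pv_sorted_snoc]
    rcases PySem.List.sorted l (fun p => p.2) true with _ | ⟨hd, t⟩
    · rfl
    · by_cases h2 : hd.2 < x.2
      · simp [pvBgStep, PySem.List.insertBy, h2]
      · simp [pvBgStep, PySem.List.insertBy, h2]

-- (head, second) of the descending stable sort = result of the top-two scan
theorem pv_scan2_eq (l : List (Int × Int)) :
    l.foldl pvSelStep (none, none) =
      ((PySem.List.sorted l (fun p => p.2) true).head?,
       (PySem.List.sorted l (fun p => p.2) true)[1]?) := by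
  induction l using List.reverseRecOn with
  | nil => rw [pv_sorted_nil]; rfl
  | append_singleton l x ih =>
    rw [List.foldl_append, List.foldl_cons, List.foldl_nil, ih, pv_sorted_snoc]
    rcases PySem.List.sorted l (fun p => p.2) true with _ | ⟨hd, t⟩
    · rfl
    · rcases t with _ | ⟨m, t'⟩
      · by_cases h2 : hd.2 < x.2
        · simp [pvSelStep, PySem.List.insertBy, h2]
        · simp [pvSelStep, PySem.List.insertBy, h2]
      · by_cases h2 : hd.2 < x.2
        · simp [pvSelStep, PySem.List.insertBy, h2]
        · by_cases h3 : m.2 < x.2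
          · simp [pvSelStep, PySem.List.insertBy, h2, h3]
          · simp [pvSelStep, PySem.List.insertBy, h2, h3]

-- filter distributes over an ordered insertion into a descending-sorted list
theorem pv_filter_insertBy (q : Int × Int → Bool) (x : Int × Int) (s : List (Int × Int))
    (hs : s.Pairwise (fun a b => b.2 ≤ a.2)) :
    (PySem.List.insertBy (fun a b => decide (b.2 < a.2)) x s).filter q =
      if q x then PySem.List.insertBy (fun a b => decide (b.2 < a.2)) x (s.filter q)
      else s.filter q := by
  induction s with
  | nil => by_cases hq : q x <;> simp [PySem.List.insertBy, hq]
  | cons hd t ih =>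
    rw [List.pairwise_cons] at hs
    by_cases h2 : hd.2 < x.2
    · -- x goes in front; everything in hd :: t compares below x
      have hall : ∀ y ∈ List.filter q (hd :: t), (decide (y.2 < x.2)) = true := by
        intro y hy
        rcases List.mem_cons.mp (List.mem_of_mem_filter hy) with h | h
        · subst h; simpa using h2
        · have := hs.1 y h
          simp only [decide_eq_true_eq]; omega
      have hins : PySem.List.insertBy (fun a b => decide (b.2 < a.2)) x (List.filter q (hd :: t)) =
          x :: List.filter q (hd :: t) := by
        rcases hf : List.filter q (hd :: t) with _ | ⟨y, ys⟩
        · rfl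
        · have := hall y (by rw [hf]; exact List.mem_cons_self)
          simp [PySem.List.insertBy, this]
      rw [show (PySem.List.insertBy (fun a b => decide (b.2 < a.2)) x (hd :: t)) = x :: hd :: t from by
            simp [PySem.List.insertBy, h2],
          List.filter_cons]
      by_cases hq : q x
      · rw [if_pos hq, if_pos hq, hins]
      · rw [if_neg (by simp [hq]), if_neg (by simp [hq])]
    · simp only [PySem.List.insertBy, h2, decide_false, Bool.false_eq_true, if_false]
      by_cases hh : q hd
      · simp only [List.filter_cons, hh, if_true, ih hs.2]
        by_cases hq : q x
        · simp [hq, PySem.List.insertBy, h2]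
        · simp [hq]
      · simp [hh, ih hs.2]

-- filtering commutes with the descending stable sort
theorem pv_filter_sorted (q : Int × Int → Bool) (l : List (Int × Int)) :
    (PySem.List.sorted l (fun p => p.2) true).filter q =
      PySem.List.sorted (l.filter q) (fun p => p.2) true := by
  induction l using List.reverseRecOn with
  | nil => rw [pv_sorted_nil]; simp [pv_sorted_nil]
  | append_singleton l x ih =>
    rw [pv_sorted_snoc, pv_filter_insertBy q x _ (PySem.List.sorted_pairwise_rev l _), ih,
      List.filter_append]
    by_cases hq : q x
    · simp only [List.filter_cons, hq, if_true, List.filter_nil, pv_sorted_snoc]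
    · simp [hq]

-- ===== VERDICT (by name: the statement is the Claim_ definition above) =====
theorem recolor_2nd_to_dominant_spec : Claim_equal_recolor_2nd_to_dominant := by
  unfold Claim_equal_recolor_2nd_to_dominant
  intro grid _
  unfold Spec_recolor_2nd_to_dominant
  rcases grid with _ | ⟨r0, rest⟩
  · rfl
  · by_cases h0 : r0 = []
    · simp [recolor_2nd_to_dominant, recolor_2nd_to_dominant_alt, h0]
    · simp only [recolor_2nd_to_dominant, recolor_2nd_to_dominant_alt, if_neg h0]
      have hflatA : List.foldl (fun acc row => List.foldl (fun a v => a ++ [v]) acc row) ([] : List Int) (r0 :: rest) = (r0 :: rest).flatten := by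
        simp only [PySem.List.foldl_append_singleton_eq_self]
        simpa using PySem.List.foldl_append_eq_flatten (r0 :: rest) []
      have hcounts : List.foldl (fun d row => List.foldl (fun d v => PySem.Dict.modify d v 0 (· + 1)) d row) PySem.Dict.empty (r0 :: rest) = PySem.Dict.counter ((r0 :: rest).flatten) := by
        rw [PySem.Dict.counter_eq_foldl, List.foldl_flatten]
      rw [hflatA, hcounts]
      have hflat : (r0 :: rest).flatten ≠ [] := by
        simp only [List.flatten_cons]
        intro h
        exact h0 (List.append_eq_nil_iff.mp h).1
      have hitem_ne : (PySem.Dict.counter ((r0 :: rest).flatten)).items ≠ [] := by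
        rw [PySem.Dict.items_counter]
        intro h
        rw [List.map_eq_nil_iff] at h
        rcases hx : (r0 :: rest).flatten with _ | ⟨v, vs⟩
        · exact hflat hx
        · have hv : v ∈ PySem.Set.ofList ((r0 :: rest).flatten) := by
            rw [PySem.Set.mem_ofList, hx]; exact List.mem_cons_self
          rw [h] at hv
          exact absurd hv (List.not_mem_nil)
      rcases hmc : PySem.List.sorted (PySem.Dict.counter ((r0 :: rest).flatten)).items (fun p => p.2) true with _ | ⟨top, mt⟩
      · exact absurd ((PySem.List.sorted_eq_nil_iff _ _ _).mp hmc) hitem_ne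
      · have hbg : (PySem.Dict.counter ((r0 :: rest).flatten)).items.foldl pvBgStep none = some top := by
          rw [pv_scan1_eq, hmc]; rfl
        rw [hbg]
        have hq : (fun (s : Option (Int × Int) × Option (Int × Int)) (it : Int × Int) => if it.1 = top.1 then s else pvSelStep s it)
            = fun s it => if ¬ (it.1 = top.1) then pvSelStep s it else s := by
          funext s it
          by_cases h : it.1 = top.1 <;> simp [h]
        have hsel : (PySem.Dict.counter ((r0 :: rest).flatten)).items.foldl
              (fun s it => if it.1 = top.1 then s else pvSelStep s it) (none, none)
            = (((top :: mt).filter (fun p => decide ¬(p.1 = top.1))).head?,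
               ((top :: mt).filter (fun p => decide ¬(p.1 = top.1)))[1]?) := by
          rw [hq, PySem.List.foldl_ite_eq_foldl_filter (fun it : Int × Int => ¬ (it.1 = top.1)) pvSelStep _ _,
            pv_scan2_eq, ← pv_filter_sorted, hmc]
        simp only []
        rw [hsel]
        rcases hF : (top :: mt).filter (fun p => decide ¬(p.1 = top.1)) with _ | ⟨b0, _ | ⟨c0, F2⟩⟩
        · rw [hF]; simp
        · rw [hF]; simp
        · rw [hF]
          have hlen : ¬ ((List.map (fun p => p.1) (b0 :: c0 :: F2)).length < 2) := by simp
          have hg1 : PySem.List.pyGetD (List.map (fun p => p.1) (b0 :: c0 :: F2)) 1 0 = c0.1 := by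
            rw [PySem.List.pyGetD_ofNat']; simp
          have hg0 : PySem.List.pyGetD (List.map (fun p => p.1) (b0 :: c0 :: F2)) 0 0 = b0.1 := by
            rw [PySem.List.pyGetD_ofNat']; simp
          rw [if_neg hlen, hg1, hg0]
          simp only [List.head?_cons, List.getElem?_cons_succ, List.getElem?_cons_zero]
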